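-- pv_equiv track=rewrite | github.com/BolatMukashev/LaboratoryBot | loader.py | update_tech_usl
-- ===== SOURCE A (Python) =====
-- from math import ceil
--
-- def update_tech_usl(tu_list: list):
--     fin_list = []
--     list_f = tu_list.copy()
--     list1_len = ceil(len(list_f) / 2)
--     for _ in range(list1_len):
--         fin_list.append([list_f.pop(0)])
--     for _ in range(len(list_f)):
--         fin_list[_].append(list_f.pop(0))
--     return fin_list
-- ===== SOURCE B (Python) =====
-- from math import ceil
-- from itertools import zip_longest
--
-- def update_tech_usl(tu_list: list):
--     half = ceil(len(tu_list) / 2)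
--     sentinel = object()
--     return [[a] if b is sentinel else [a, b]
--             for a, b in zip_longest(tu_list[:half], tu_list[half:], fillvalue=sentinel)]
-- ===== Notes on version B (the rewrite author's own statement) =====
-- stated objective: idiomatic
-- what changed: B slices the list into its two halves and pairs them in one zip_longest comprehension, instead of A's two-pass scheme of popping the front to build singletons and then appending into them by index.
import Mathlib
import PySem

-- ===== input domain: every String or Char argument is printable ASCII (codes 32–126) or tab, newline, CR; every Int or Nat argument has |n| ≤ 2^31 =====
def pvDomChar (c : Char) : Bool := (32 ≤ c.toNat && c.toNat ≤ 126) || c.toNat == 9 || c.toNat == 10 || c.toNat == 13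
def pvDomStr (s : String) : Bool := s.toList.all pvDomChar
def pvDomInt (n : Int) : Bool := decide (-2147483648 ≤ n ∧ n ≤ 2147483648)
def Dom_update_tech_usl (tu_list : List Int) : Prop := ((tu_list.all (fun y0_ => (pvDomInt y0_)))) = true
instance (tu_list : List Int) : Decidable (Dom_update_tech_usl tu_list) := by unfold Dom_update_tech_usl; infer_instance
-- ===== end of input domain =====

-- B replaces A's two passes (pop the front into singletons, then append into them by index)
-- by slicing the list into its two halves and pairing them in one zip_longest-style pass.

-- ===== PORT A =====
-- first loop: for _ in range(list1_len): fin_list.append([list_f.pop(0)])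
-- (pop(0) cannot raise: the loop count never exceeds len(list_f); the 'none' branch is an unreachable totality guard)
def pvLoop1 : Nat → List (List Int) → List Int → (List (List Int) × List Int)
  | 0, fin, lf => (fin, lf)
  | k+1, fin, lf =>
    match PySem.List.pop? lf 0 with
    | some (x, rest) => pvLoop1 k (fin ++ [[x]]) rest
    | none => (fin, lf)

-- second loop: for _ in range(len(list_f)): fin_list[_].append(list_f.pop(0))
def pvLoop2 : Nat → Nat → List (List Int) → List Int → List (List Int)
  | 0, _, fin, _ => fin
  | k+1, i, fin, lf =>
    match PySem.List.pop? lf 0 with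
    | some (x, rest) => pvLoop2 k (i+1) (fin.set i (fin.getD i [] ++ [x])) rest
    | none => fin

def update_tech_usl (tu_list : List Int) : List (List Int) :=
  let list_f := tu_list                       -- tu_list.copy()
  let list1_len := (list_f.length + 1) / 2    -- ceil(len/2) = (n+1)/2 for n ≥ 0
  let (fin_list, list_f) := pvLoop1 list1_len [] list_f
  pvLoop2 list_f.length 0 fin_list list_f

-- ===== PORT B =====
-- zip_longest(first, second, fillvalue=sentinel) with [a] if b is sentinel else [a, b];
-- second is never longer than first here, so the exhausted-first case is an unreachable guard
def pvZipHalves : List Int → List Int → List (List Int)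
  | [], _ => []
  | a :: as, [] => [a] :: pvZipHalves as []
  | a :: as, b :: bs => [a, b] :: pvZipHalves as bs

def update_tech_usl_alt (tu_list : List Int) : List (List Int) :=
  let half := (tu_list.length + 1) / 2        -- ceil(len/2)
  pvZipHalves (PySem.List.slice tu_list none (some (half : Int)))
              (PySem.List.slice tu_list (some (half : Int)) none)

-- ===== PRECONDITION & SPEC =====
def Spec_update_tech_usl (tu_list : List Int) (out : List (List Int)) : Prop := out = update_tech_usl_alt tu_list
instance (tu_list : List Int) (out : List (List Int)) : Decidable (Spec_update_tech_usl tu_list out) := by unfold Spec_update_tech_usl; infer_instance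

-- ===== CLAIM (what is proved, stated in full; the proofs are below) =====
def Claim_equal_update_tech_usl : Prop := ∀ (tu_list : List Int), Dom_update_tech_usl tu_list → Spec_update_tech_usl tu_list (update_tech_usl tu_list)

-- ===== LEMMAS AND PROOFS =====

theorem pvLoop1_spec (k : Nat) : ∀ (fin : List (List Int)) (lf : List Int), k ≤ lf.length →
    pvLoop1 k fin lf = (fin ++ (lf.take k).map (fun x => [x]), lf.drop k) := by
  induction k with
  | zero => intro fin lf _; simp [pvLoop1]
  | succ k ih =>
    intro fin lf hk
    match lf with
    | [] => simp at hk
    | x :: rest =>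
      simp [pvLoop1, PySem.List.pop?_zero_cons]
      rw [ih (fin ++ [[x]]) rest (by simpa using hk)]
      simp

theorem pvZip_nil (f : List Int) : pvZipHalves f [] = f.map (fun x => [x]) := by
  induction f with
  | nil => rfl
  | cons a as ih => simp [pvZipHalves, ih]

theorem pvLoop2_spec (s : List Int) : ∀ (f : List Int) (pre : List (List Int)),
    s.length ≤ f.length →
    pvLoop2 s.length pre.length (pre ++ f.map (fun x => [x])) s = pre ++ pvZipHalves f s := by
  induction s with
  | nil => intro f pre _; simp [pvLoop2, pvZip_nil]
  | cons b bs ih =>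
    intro f pre hlen
    match f with
    | [] => simp at hlen
    | a :: as =>
      show pvLoop2 (bs.length + 1) pre.length (pre ++ [a] :: as.map (fun x => [x])) (b :: bs) = _
      simp only [pvLoop2, PySem.List.pop?_zero_cons]
      have hget : (pre ++ [a] :: as.map (fun x => [x])).getD pre.length [] = [a] := by
        simp [List.getD]
      have hset : (pre ++ [a] :: as.map (fun x => [x])).set pre.length ([a] ++ [b])
          = (pre ++ [[a, b]]) ++ as.map (fun x => [x]) := by
        rw [List.set_append_right _ _ (le_refl _)]
        simp
      rw [hget, hset]
      have := ih as (pre ++ [[a, b]]) (by simpa using hlen)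
      simp only [List.length_append, List.length_cons] at this ⊢
      simpa [pvZipHalves] using this

-- ===== VERDICT (by name: the statement is the Claim_ definition above) =====
theorem update_tech_usl_spec : Claim_equal_update_tech_usl := by
  intro l _
  unfold Spec_update_tech_usl update_tech_usl update_tech_usl_alt
  have h1 : (l.length + 1) / 2 ≤ l.length := by omega
  simp only [pvLoop1_spec _ [] l h1]
  simp only [List.nil_append, List.length_drop]
  have h2 : l.length - (l.length + 1) / 2 ≤ (l.take ((l.length + 1) / 2)).length := by
    simp; omega
  have hd : (l.drop ((l.length + 1) / 2)).length = l.length - (l.length + 1) / 2 := by simp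
  have := pvLoop2_spec (l.drop ((l.length + 1) / 2)) (l.take ((l.length + 1) / 2)) []
    (by rw [hd]; simpa using h2)
  simp only [List.nil_append, List.length_nil, hd] at this
  rw [this]
  rw [PySem.List.slice_to_natCast, PySem.List.slice_from_natCast]
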